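-- pv_equiv track=rewrite | github.com/BenjaminDOUCHET/Travail-FIL | L1/base prog/tp6/parenthese.py | nbre_facteurs
-- ===== SOURCE A (Python) =====
-- def nbre_facteurs(s) :
--     """
--     fonction nous renvoyant le nombre de facteur de parenthèse dans la str s
--     s (str) chaine de parenthèse valide
--     C.U insérer une str de parenthèse valide
-- >>> nbre_facteurs("()(()())")
-- 2
-- >>> nbre_facteurs("(())()(()())")
-- 3
--     """
--     ouv = 0
--     ferm = 0
--     temp = 0
--
--     for c in s :
--         if c == '(' :
--             ouv = ouv +1
--         else :
--             ferm = ferm +1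
--         if ouv == ferm :
--             temp = temp + 1
--     return temp
-- ===== SOURCE B (Python) =====
-- def fin_premier_facteur(s, pos):
--     """index where the factor starting at pos closes (running balance back to 0), or None"""
--     bal = 0
--     for i in range(pos, len(s)):
--         bal += 1 if s[i] == '(' else -1
--         if bal == 0:
--             return i
--     return None
--
-- def nbre_facteurs(s):
--     # repeatedly split off the leading balanced factor and count the factors
--     total = 0
--     pos = 0
--     while pos < len(s):
--         j = fin_premier_facteur(s, pos)
--         if j is None:
--             break
--         total += 1
--         pos = j + 1
--     return total
-- ===== Notes on version B (the rewrite author's own statement) =====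
-- stated objective: alternative
-- what changed: B repeatedly splits off the leading balanced factor (an inner scan finds where the running balance first returns to 0, the outer loop counts one factor and restarts past it), instead of A's single loop over all characters maintaining open/close counters with an inline equality test.
import Mathlib
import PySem

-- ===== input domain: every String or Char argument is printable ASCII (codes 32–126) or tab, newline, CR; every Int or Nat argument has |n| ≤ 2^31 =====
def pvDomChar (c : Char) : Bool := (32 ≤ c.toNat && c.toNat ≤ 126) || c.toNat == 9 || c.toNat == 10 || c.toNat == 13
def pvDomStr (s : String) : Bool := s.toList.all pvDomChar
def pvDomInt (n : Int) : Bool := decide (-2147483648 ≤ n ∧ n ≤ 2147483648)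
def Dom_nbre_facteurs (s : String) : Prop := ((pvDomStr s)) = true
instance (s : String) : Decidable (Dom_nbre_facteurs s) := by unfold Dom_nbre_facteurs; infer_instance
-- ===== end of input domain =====

-- B counts factors by repeatedly splitting off the leading balanced factor, instead of A's single counter loop (alternative decomposition, same cost).
-- ===== PORT A =====
def nbre_facteurs (s : String) : Int :=
  (s.toList.foldl
    (fun (st : Int × Int × Int) c =>
      let ouv := if c = '(' then st.1 + 1 else st.1
      let ferm := if c = '(' then st.2.1 else st.2.1 + 1
      let temp := if ouv = ferm then st.2.2 + 1 else st.2.2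
      (ouv, ferm, temp))
    (0, 0, 0)).2.2

-- ===== PORT B =====
-- inner scan of Source B's fin_premier_facteur, on the suffix starting at pos:
-- offset where the running balance first returns to 0, or none
def pvFinFac : List Char → Int → Option Nat
  | [], _ => none
  | c :: cs, bal =>
      let b := bal + (if c = '(' then 1 else -1)
      if b = 0 then some 0 else (pvFinFac cs b).map (· + 1)

-- used by pvCountFacs's termination: the factor end lies inside the list
theorem pvFinFac_lt : ∀ (l : List Char) (b : Int) (j : Nat), pvFinFac l b = some j → j < l.length := by
  intro l
  induction l with
  | nil => intro b j h; simp [pvFinFac] at h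
  | cons c cs ih =>
      intro b j h
      simp only [pvFinFac] at h
      by_cases hb : (b + (if c = '(' then 1 else -1)) = 0
      · rw [if_pos hb] at h
        cases h
        simp
      · rw [if_neg hb] at h
        obtain ⟨k, hk, rfl⟩ := Option.map_eq_some_iff.mp h
        have := ih _ _ hk
        simp
        omega

-- outer while loop of Source B: count a factor, advance past its end, repeat
def pvCountFacs (l : List Char) : Int :=
  match h : pvFinFac l 0 with
  | none => 0
  | some j => 1 + pvCountFacs (l.drop (j + 1))
termination_by l.length
decreasing_by
  have := pvFinFac_lt l 0 j h
  simp [List.length_drop]; omega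

def nbre_facteurs_alt (s : String) : Int := pvCountFacs s.toList

-- ===== PRECONDITION & SPEC =====
def Spec_nbre_facteurs (s : String) (out : Int) : Prop := out = nbre_facteurs_alt s
instance (s : String) (out : Int) : Decidable (Spec_nbre_facteurs s out) := by unfold Spec_nbre_facteurs; infer_instance

-- ===== CLAIM (what is proved, stated in full; the proofs are below) =====
def Claim_equal_nbre_facteurs : Prop := ∀ (s : String), Dom_nbre_facteurs s → Spec_nbre_facteurs s (nbre_facteurs s)

-- ===== LEMMAS AND PROOFS =====
-- proof-only helper: the prefix-balance sequence of l starting from bal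
def pvPrefixes : List Char → Int → List Int
  | [], _ => []
  | c :: cs, bal =>
      let bal' := bal + (if c = '(' then 1 else -1)
      bal' :: pvPrefixes cs bal'

-- A's temp counts the zeros of the prefix-balance sequence
theorem pvFold_eq_count (l : List Char) (ouv ferm temp : Int) :
    (l.foldl
      (fun (st : Int × Int × Int) c =>
        let ouv := if c = '(' then st.1 + 1 else st.1
        let ferm := if c = '(' then st.2.1 else st.2.1 + 1
        let temp := if ouv = ferm then st.2.2 + 1 else st.2.2
        (ouv, ferm, temp))
      (ouv, ferm, temp)).2.2
    = temp + ((pvPrefixes l (ouv - ferm)).count 0 : Int) := by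
  induction l generalizing ouv ferm temp with
  | nil => simp [pvPrefixes]
  | cons c cs ih =>
      simp only [List.foldl_cons, pvPrefixes]
      by_cases hc : c = '('
      · simp only [hc, ih, List.count_cons, beq_iff_eq]
        split_ifs <;> push_cast <;> ring_nf <;> omega
      · have e1 : ouv - (ferm + 1) = ouv - ferm + -1 := by ring
        simp only [if_neg hc, ih, e1, List.count_cons, beq_iff_eq]
        split_ifs <;> push_cast <;> ring_nf <;> omega

-- splitting off the first zero of the prefix-balance sequence
theorem pvCount_split (l : List Char) : ∀ (b : Int),
    ((pvPrefixes l b).count 0 : Int)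
      = (match pvFinFac l b with
         | none => 0
         | some j => 1 + ((pvPrefixes (l.drop (j + 1)) 0).count 0 : Int)) := by
  induction l with
  | nil => intro b; simp [pvPrefixes, pvFinFac]
  | cons c cs ih =>
      intro b
      simp only [pvPrefixes, pvFinFac]
      by_cases hb : b + (if c = '(' then 1 else -1) = 0
      · simp [hb]
        ring
      · rw [if_neg hb]
        rcases hf : pvFinFac cs (b + (if c = '(' then 1 else -1)) with _ | j
        · have := ih (b + (if c = '(' then 1 else -1))
          rw [hf] at this
          simp only [List.count_cons, beq_iff_eq, hb, if_false]
          simp [this]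
        · have := ih (b + (if c = '(' then 1 else -1))
          rw [hf] at this
          simp only [List.count_cons, beq_iff_eq, hb, if_false, Option.map_some]
          simpa [List.drop_succ_cons] using this

theorem pvCountFacs_eq (l : List Char) : pvCountFacs l = ((pvPrefixes l 0).count 0 : Int) := by
  induction l using pvCountFacs.induct with
  | case1 l h => rw [pvCountFacs, h, pvCount_split l 0, h]
  | case2 l j h ih =>
      rw [pvCountFacs, h, pvCount_split l 0, h]
      simp [ih]

-- ===== VERDICT (by name: the statement is the Claim_ definition above) =====
theorem nbre_facteurs_spec : Claim_equal_nbre_facteurs := by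
  intro s _
  unfold Spec_nbre_facteurs nbre_facteurs nbre_facteurs_alt
  rw [pvFold_eq_count, pvCountFacs_eq]
  norm_num
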